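-- pv_equiv track=rewrite | github.com/Tologon-Abakirov/FLP | Untitled10.py | find_shortest_word_with_char
-- ===== SOURCE A (Python) =====
-- def find_shortest_word_with_char(sentence, char):
--     words = sentence.split()  # Разделяем строку на слова
--     shortest_word = None
--
--     for word in words:
--         # Проверяем, содержит ли слово символ
--         if char in word:
--             # Или можно заменить на: if word.find(char) != -1:
--             if shortest_word is None or len(word) < len(shortest_word):
--                 shortest_word = word
--
--     return shortest_word
-- ===== SOURCE B (Python) =====
-- def find_shortest_word_with_char(sentence, char):
--     for word in sorted(sentence.split(), key=len):
--         if char in word: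
--             return word
--     return None
-- ===== Notes on version B (the rewrite author's own statement) =====
-- stated objective: alternative
-- what changed: Replaces A's single-pass running-minimum scan by a sort-then-first-match strategy: sort the words by length with Python's stable sort, then return the first sorted word containing the character (stability makes ties resolve to the first-encountered shortest word, as in A), None if none matches.
import Mathlib
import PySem

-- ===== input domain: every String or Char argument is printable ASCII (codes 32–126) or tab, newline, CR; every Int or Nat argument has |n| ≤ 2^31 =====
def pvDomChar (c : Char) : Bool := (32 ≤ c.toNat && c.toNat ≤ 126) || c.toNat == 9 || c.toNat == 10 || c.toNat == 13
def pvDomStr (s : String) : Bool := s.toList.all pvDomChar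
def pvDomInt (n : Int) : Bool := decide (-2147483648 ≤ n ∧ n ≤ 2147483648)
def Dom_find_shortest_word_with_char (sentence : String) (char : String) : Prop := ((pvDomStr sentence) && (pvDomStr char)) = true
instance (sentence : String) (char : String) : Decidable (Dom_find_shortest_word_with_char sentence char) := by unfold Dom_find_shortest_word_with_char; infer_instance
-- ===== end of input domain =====

-- B replaces A's running-minimum scan by stable sort-by-length then first match: alternative algorithm, same result.

-- ===== PORT A =====
-- A: split, then one scan keeping the shortest matching word seen so far (None sentinel).
def find_shortest_word_with_char (sentence : String) (char : String) : Option String :=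
  (PySem.Str.split₀ sentence).foldl
    (fun shortest word =>
      if PySem.Str.isIn char word then
        match shortest with
        | none => some word
        | some s => if PySem.Str.len word < PySem.Str.len s then some word else some s
      else shortest)
    none

-- ===== PORT B =====
-- B: stable-sort the words by length, return the first sorted word containing char, none if no match.
def find_shortest_word_with_char_alt (sentence : String) (char : String) : Option String :=
  (PySem.List.sorted (PySem.Str.split₀ sentence) PySem.Str.len).find?
    (fun word => PySem.Str.isIn char word)

-- ===== PRECONDITION & SPEC =====
def Spec_find_shortest_word_with_char (sentence : String) (char : String) (out : Option String) : Prop := out = find_shortest_word_with_char_alt sentence char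
instance (sentence : String) (char : String) (out : Option String) : Decidable (Spec_find_shortest_word_with_char sentence char out) := by unfold Spec_find_shortest_word_with_char; infer_instance

-- ===== CLAIM (what is proved, stated in full; the proofs are below) =====
def Claim_equal_find_shortest_word_with_char : Prop := ∀ (sentence : String) (char : String), Dom_find_shortest_word_with_char sentence char → Spec_find_shortest_word_with_char sentence char (find_shortest_word_with_char sentence char)

-- ===== LEMMAS AND PROOFS =====

-- A's accumulator step, abstracted.
def pvStep (char : String) (shortest : Option String) (word : String) : Option String :=
  if PySem.Str.isIn char word then
    match shortest with
    | none => some word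
    | some s => if PySem.Str.len word < PySem.Str.len s then some word else some s
  else shortest

-- Whatever find? returns on a length-sorted list is at least as long as the head.
theorem find?_len_ge_head (p : String → Bool) (y : String) (t : List String)
    (hs : (y :: t).Pairwise (fun a b => PySem.Str.len a ≤ PySem.Str.len b))
    {s : String} (hf : (y :: t).find? p = some s) : PySem.Str.len y ≤ PySem.Str.len s := by
  have hmem := List.mem_of_find?_eq_some hf
  rcases List.mem_cons.mp hmem with h | h
  · exact le_of_eq (by rw [h])
  · exact (List.pairwise_cons.mp hs).1 s h

-- Inserting x into a length-sorted list and taking the first match = A's step on the first match of the old list.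
theorem find?_insertBy (char x : String) (ys : List String)
    (hs : ys.Pairwise (fun a b => PySem.Str.len a ≤ PySem.Str.len b)) :
    (PySem.List.insertBy (fun a b => decide (PySem.Str.len a < PySem.Str.len b)) x ys).find?
        (fun w => PySem.Str.isIn char w)
      = pvStep char (ys.find? (fun w => PySem.Str.isIn char w)) x := by
  induction ys with
  | nil =>
    simp only [PySem.List.insertBy, List.find?, pvStep]
    cases PySem.Str.isIn char x <;> rfl
  | cons y t ih =>
    simp only [PySem.List.insertBy]
    by_cases hlt : PySem.Str.len x < PySem.Str.len y
    · rw [if_pos (by exact decide_eq_true hlt)]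
      cases hx : PySem.Str.isIn char x with
      | true =>
        rw [List.find?_cons_of_pos hx]
        cases hf : (y :: t).find? (fun w => PySem.Str.isIn char w) with
        | none => simp only [pvStep, hx, if_pos]
        | some s =>
          have hys : PySem.Str.len y ≤ PySem.Str.len s :=
            find?_len_ge_head _ y t hs hf
          have hxs : PySem.Str.len x < PySem.Str.len s := lt_of_lt_of_le hlt hys
          simp only [pvStep, hx, if_pos]
          rw [if_pos hxs]
      | false =>
        rw [List.find?_cons_of_neg (by rw [hx]; exact Bool.false_ne_true)]
        simp only [pvStep, hx]
        rfl
    · rw [if_neg (by simpa using hlt)]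
      have hy : PySem.Str.len y ≤ PySem.Str.len x := le_of_not_gt hlt
      cases hyp : PySem.Str.isIn char y with
      | true =>
        rw [List.find?_cons_of_pos hyp, List.find?_cons_of_pos hyp]
        simp only [pvStep]
        cases hx : PySem.Str.isIn char x with
        | true => rw [if_pos rfl, if_neg (not_lt.mpr hy)]
        | false => rfl
      | false =>
        rw [List.find?_cons_of_neg (by rw [hyp]; exact Bool.false_ne_true),
            List.find?_cons_of_neg (by rw [hyp]; exact Bool.false_ne_true)]
        exact ih (List.pairwise_cons.mp hs).2

-- Over a whole word list: first match of the stable length-sort equals A's left fold.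
theorem find?_sorted_eq_foldl (char : String) (ws : List String) :
    (PySem.List.sorted ws PySem.Str.len).find? (fun w => PySem.Str.isIn char w)
      = ws.foldl (pvStep char) none := by
  induction ws using List.reverseRecOn with
  | nil => simp [PySem.List.sorted_eq_foldl_insertBy]
  | append_singleton t x ih =>
    rw [PySem.List.sorted_eq_foldl_insertBy, List.foldl_append, List.foldl_append]
    simp only [List.foldl]
    rw [← PySem.List.sorted_eq_foldl_insertBy,
        find?_insertBy char x _ (PySem.List.sorted_pairwise t PySem.Str.len), ih]

-- ===== VERDICT (by name: the statement is the Claim_ definition above) =====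
theorem find_shortest_word_with_char_spec : Claim_equal_find_shortest_word_with_char := by
  intro sentence char _
  unfold Spec_find_shortest_word_with_char find_shortest_word_with_char find_shortest_word_with_char_alt
  rw [find?_sorted_eq_foldl]
  rfl
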